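-- pv_equiv track=rewrite | github.com/Chri5pp/FFT-bachelor-project | Multinomials/Multinomial.py | get_all_args
-- ===== SOURCE A (Python) =====
-- def get_all_args(a_vals, b_vals):
--     points = []
--     for i in range(1 << len(a_vals)):
--         point = []
--         for j in range(len(a_vals)):
--             point.append(b_vals[j] if (i >> j) & 1 else a_vals[j])
--         points.append(point)
--     return points
-- ===== SOURCE B (Python) =====
-- def get_all_args(a_vals, b_vals):
--     points = [[]]
--     for a, b in zip(a_vals, b_vals):
--         points = [p + [v] for v in (a, b) for p in points]
--     return points
-- ===== Notes on version B (the rewrite author's own statement) =====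
-- stated objective: alternative
-- what changed: A enumerates all counters i in range(2^n) and re-extracts every bit of i in an inner index loop; B does a single doubling fold over zip(a_vals, b_vals) that extends every partial point with the a/b value at each position, producing the same bit-0-fastest order with no bit arithmetic and no indexing.
-- outside the precondition, e.g. on get_all_args([1, 2], [5]): A raises IndexError, B returns [[1], [5]]
import Mathlib
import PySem

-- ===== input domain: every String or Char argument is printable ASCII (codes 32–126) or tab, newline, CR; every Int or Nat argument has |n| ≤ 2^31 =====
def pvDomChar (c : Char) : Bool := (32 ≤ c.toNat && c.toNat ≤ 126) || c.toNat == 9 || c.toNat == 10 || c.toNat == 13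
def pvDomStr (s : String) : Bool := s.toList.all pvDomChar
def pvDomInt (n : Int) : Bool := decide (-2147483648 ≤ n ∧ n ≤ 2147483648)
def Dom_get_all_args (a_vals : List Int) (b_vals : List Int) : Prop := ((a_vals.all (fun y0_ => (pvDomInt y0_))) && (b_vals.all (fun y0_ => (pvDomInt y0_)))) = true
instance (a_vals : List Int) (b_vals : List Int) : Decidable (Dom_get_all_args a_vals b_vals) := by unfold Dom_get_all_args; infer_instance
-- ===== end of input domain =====

-- B replaces A's per-index bit-extraction of every i in range(2^n) by a single doubling fold
-- that extends all partial points with the a/b choice at each position (objective: alternative).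

-- ===== PORT A =====
-- Literal port of A: for i in range(1 << len(a_vals)): for j in range(len(a_vals)):
-- point.append(b_vals[j] if (i >> j) & 1 else a_vals[j]).  j comes from range(len(a_vals)),
-- so j ≥ 0 and 'j.toNat' as the shift amount is exact; indexing uses pyGetD under
-- Pre_get_all_args (b_vals[j] would raise IndexError when len(b_vals) < len(a_vals)).
def get_all_args (a_vals : List Int) (b_vals : List Int) : List (List Int) :=
  (PySem.List.pyRange 0 ((1 : Int) <<< a_vals.length) 1).foldl (fun points i =>
    points ++ [(PySem.List.pyRange 0 (PySem.List.len a_vals) 1).foldl (fun point j =>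
      point ++ [if PySem.Int.band (i >>> j.toNat) 1 ≠ 0 then PySem.List.pyGetD b_vals j 0
                else PySem.List.pyGetD a_vals j 0]) []]) []

-- ===== PORT B =====
-- Literal port of B: points = [[]]; for a, b in zip(a_vals, b_vals):
--   points = [p + [v] for v in (a, b) for p in points]
def get_all_args_alt (a_vals : List Int) (b_vals : List Int) : List (List Int) :=
  (a_vals.zip b_vals).foldl (fun points ab =>
    [ab.1, ab.2].flatMap (fun v => points.map (fun p => p ++ [v]))) [[]]

-- ===== PRECONDITION & SPEC =====
-- Pre_ excludes exactly the inputs where A raises IndexError: b_vals shorter than a_vals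
-- (then b_vals[j] is out of range for some j reached by the inner loop).
def Pre_get_all_args (a_vals : List Int) (b_vals : List Int) : Prop :=
  a_vals.length ≤ b_vals.length
instance (a_vals : List Int) (b_vals : List Int) : Decidable (Pre_get_all_args a_vals b_vals) := by
  unfold Pre_get_all_args; infer_instance
def pvWitness_get_all_args : List Int × List Int := ([1, 2], [5, 6])

def Spec_get_all_args (a_vals : List Int) (b_vals : List Int) (out : List (List Int)) : Prop := out = get_all_args_alt a_vals b_vals
instance (a_vals : List Int) (b_vals : List Int) (out : List (List Int)) : Decidable (Spec_get_all_args a_vals b_vals out) := by unfold Spec_get_all_args; infer_instance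

-- ===== CLAIM (what is proved, stated in full; the proofs are below) =====
def Claim_equal_get_all_args : Prop := ∀ (a_vals : List Int) (b_vals : List Int), Dom_get_all_args a_vals b_vals → Pre_get_all_args a_vals b_vals → Spec_get_all_args a_vals b_vals (get_all_args a_vals b_vals)

-- ===== LEMMAS AND PROOFS =====

-- The point selected by counter i over a list of (a, b) pairs: bit 0 of i decides position 0, …
def pvPoint : List (Int × Int) → Nat → List Int
  | [], _ => []
  | ab :: t, i => (if i % 2 = 1 then ab.2 else ab.1) :: pvPoint t (i / 2)

theorem pvRange_double (g : Nat → List (List Int)) (m : Nat) :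
    (List.range (2 * m)).flatMap g
      = (List.range m).flatMap (fun k => g (2 * k) ++ g (2 * k + 1)) := by
  induction m with
  | zero => rfl
  | succ m ih =>
    have h : 2 * (m + 1) = (2 * m) + 1 + 1 := by ring
    rw [h, List.range_succ, List.range_succ, List.range_succ]
    simp [ih]

-- B's fold computes, for any stock of partial points, the bit-indexed enumeration.
theorem pvAlt_foldl (l : List (Int × Int)) (pts : List (List Int)) :
    l.foldl (fun points ab =>
        [ab.1, ab.2].flatMap (fun v => points.map (fun p => p ++ [v]))) pts
      = (List.range (2 ^ l.length)).flatMap (fun i => pts.map (fun p => p ++ pvPoint l i)) := by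
  induction l generalizing pts with
  | nil => simp [pvPoint]
  | cons ab t ih =>
    rw [List.foldl_cons, ih]
    have h2 : 2 ^ (ab :: t).length = 2 * 2 ^ t.length := by
      simp [pow_succ]; ring
    rw [h2, pvRange_double]
    refine List.flatMap_congr ?_
    intro k hk
    have e0 : (2 * k) % 2 = 0 := by omega
    have e0' : (2 * k) / 2 = k := by omega
    have e1 : (2 * k + 1) % 2 = 1 := by omega
    have e1' : (2 * k + 1) / 2 = k := by omega
    simp [pvPoint, e0, e0', e1, e1', List.flatMap_cons, List.map_map, Function.comp_def]

theorem pvAlt_eq (a_vals b_vals : List Int) :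
    get_all_args_alt a_vals b_vals
      = (List.range (2 ^ (a_vals.zip b_vals).length)).map (pvPoint (a_vals.zip b_vals)) := by
  rw [get_all_args_alt, pvAlt_foldl]
  simp [← List.map_eq_flatMap]

-- The inner loop of A, characterised as pvPoint of the zipped lists.
theorem pvPointA_eq (a_vals : List Int) :
    ∀ (b_vals : List Int), a_vals.length ≤ b_vals.length → ∀ (i : Nat),
    (List.range a_vals.length).map (fun j =>
        if (i >>> j) % 2 = 1 then b_vals.getD j 0 else a_vals.getD j 0)
      = pvPoint (a_vals.zip b_vals) i := by
  induction a_vals with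
  | nil => intro b _ i; simp [pvPoint]
  | cons x a' ih =>
    intro b hb i
    cases b with
    | nil => simp at hb
    | cons y b' =>
      simp only [List.length_cons] at hb
      simp only [List.length_cons]
      rw [List.range_succ_eq_map, List.map_cons, List.map_map]
      simp only [List.zip_cons_cons, pvPoint]
      congr 1
      rw [← ih b' (by omega) (i / 2)]
      apply List.map_congr_left
      intro j hj
      have hs : i >>> (j + 1) = (i / 2) >>> j := by
        simp [Nat.shiftRight_eq_div_pow, pow_succ, Nat.div_div_eq_div_mul]
        ring_nf
      simp [hs, List.getD]

theorem pvA_eq (a_vals b_vals : List Int) (h : a_vals.length ≤ b_vals.length) :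
    get_all_args a_vals b_vals
      = (List.range (2 ^ a_vals.length)).map (pvPoint (a_vals.zip b_vals)) := by
  rw [get_all_args]
  have hpow : (1 : Int) <<< a_vals.length = ((2 ^ a_vals.length : Nat) : Int) := by
    simp [Int.shiftLeft_eq]
  rw [hpow, PySem.List.pyRange_zero_natCast,
    PySem.List.foldl_append_singleton_eq_map, List.nil_append, List.map_map]
  apply List.map_congr_left
  intro i _
  rw [← pvPointA_eq a_vals b_vals h i]
  simp only [Function.comp_def, PySem.List.len_eq, PySem.List.pyRange_zero_natCast,
    PySem.List.foldl_append_singleton_eq_map, List.nil_append, List.map_map]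
  apply List.map_congr_left
  intro j _
  have hc : (PySem.Int.band (((i:Int)) >>> ((j:Int)).toNat) 1 ≠ 0) ↔ ((i >>> j) % 2 = 1) := by
    have hr : ((i:Int) >>> j) = ((i >>> j : Nat) : Int) := rfl
    rw [Int.toNat_natCast, hr, PySem.Int.band_one,
      show (2:Int) = ((2:Nat):Int) from rfl, PySem.Int.mod_natCast]
    omega
  simp only [PySem.List.pyGetD_natCast]
  split_ifs with h1 h2 h2 <;> first | rfl | (exact absurd (hc.mp h1) h2) | (exact absurd (hc.mpr h2) h1)

-- ===== VERDICT (by name: the statement is the Claim_ definition above) =====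
theorem get_all_args_spec : Claim_equal_get_all_args := by
  intro a_vals b_vals _ hpre
  unfold Spec_get_all_args
  rw [pvA_eq a_vals b_vals hpre, pvAlt_eq]
  have hp : a_vals.length ≤ b_vals.length := hpre
  have : (a_vals.zip b_vals).length = a_vals.length := by
    simp [List.length_zip]; omega
  rw [this]
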